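-- pv_equiv track=rewrite | github.com/anhducnguyen2006/CSES_problem_set | permutations.py | solve
-- ===== SOURCE A (Python) =====
-- def solve(n):
-- 	if n == 1:
-- 		return 1
-- 	if  n == 2 or n == 3:
-- 		return "NO SOLUTION"
-- 		return 0
-- 	s = ""
-- 	if n%2==0:
-- 		for i in range(2, n+1, 2):
-- 			s += str(i)+' '
-- 		for i in range(1, n, 2):
-- 			s += str(i)+' '
-- 	else:
-- 		for i in range(2, n, 2):
-- 			s += str(i)+' '
-- 		for i in range(1, n+1, 2):
-- 			s += str(i)+' '
-- 	return s
-- ===== SOURCE B (Python) =====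
-- def solve(n):
--     if n == 1:
--         return 1
--     if n == 2 or n == 3:
--         return "NO SOLUTION"
--     perm = sorted(range(1, n + 1), key=lambda x: x % 2)
--     return ''.join(str(x) + ' ' for x in perm)
-- ===== Notes on version B (the rewrite author's own statement) =====
-- stated objective: idiomatic
-- what changed: Replaces the two explicit parity-branched accumulation loops (string += over two step-2 ranges, chosen by n's parity) with a single stable sort of range(1,n+1) by key x%2 followed by one join.
-- outside the precondition, e.g. on solve(1): A returns 1, B returns 1
import Mathlib
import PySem

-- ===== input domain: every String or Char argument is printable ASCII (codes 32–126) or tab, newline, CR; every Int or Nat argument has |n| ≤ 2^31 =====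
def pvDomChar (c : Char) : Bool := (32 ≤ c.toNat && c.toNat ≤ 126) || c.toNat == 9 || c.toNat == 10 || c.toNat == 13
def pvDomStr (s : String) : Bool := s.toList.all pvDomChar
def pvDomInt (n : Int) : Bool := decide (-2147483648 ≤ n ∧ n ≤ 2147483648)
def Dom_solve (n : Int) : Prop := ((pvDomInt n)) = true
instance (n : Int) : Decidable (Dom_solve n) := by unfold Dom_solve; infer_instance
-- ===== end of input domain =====

-- B replaces A's parity-branched pair of accumulation loops by one stable sort of
-- range(1,n+1) with key x%2 followed by a single join (idiomatic; same output).
-- A returns the *int* 1 for n == 1 (not a string); Pre_solve excludes that input.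

-- ===== PORT A =====
-- A accumulates 's += str(i) + " "' over two step-2 ranges chosen by n's parity;
-- ported on List Char (String.ofList at the end) so the kernel can reduce it.
def solve (n : Int) : String :=
  if n = 1 then "1"  -- n = 1 is outside Pre_solve: Python A returns the integer 1 here
  else if n = 2 ∨ n = 3 then "NO SOLUTION"
  else
    if PySem.Int.mod n 2 = 0 then
      String.ofList ((PySem.List.pyRange 1 n 2).foldl
        (fun s i => s ++ (PySem.Int.toChars i ++ [' ']))
        ((PySem.List.pyRange 2 (n + 1) 2).foldl
          (fun s i => s ++ (PySem.Int.toChars i ++ [' '])) []))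
    else
      String.ofList ((PySem.List.pyRange 1 (n + 1) 2).foldl
        (fun s i => s ++ (PySem.Int.toChars i ++ [' ']))
        ((PySem.List.pyRange 2 n 2).foldl
          (fun s i => s ++ (PySem.Int.toChars i ++ [' '])) []))

-- ===== PORT B =====
def solve_alt (n : Int) : String :=
  if n = 1 then "1"  -- n = 1 is outside Pre_solve: Python B returns the integer 1 here
  else if n = 2 ∨ n = 3 then "NO SOLUTION"
  else
    let perm := PySem.List.sorted (PySem.List.pyRange 1 (n + 1) 1) (fun x => PySem.Int.mod x 2)
    String.ofList ((perm.map (fun x => PySem.Int.toChars x ++ [' '])).flatten)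

-- ===== PRECONDITION & SPEC =====
-- Pre_solve excludes only n = 1, where Python A returns the integer 1, which is
-- not a value of the declared String return type.
def Pre_solve (n : Int) : Prop := n ≠ 1
instance (n : Int) : Decidable (Pre_solve n) := by unfold Pre_solve; infer_instance
def pvWitness_solve : Int := 6

def Spec_solve (n : Int) (out : String) : Prop := out = solve_alt n
instance (n : Int) (out : String) : Decidable (Spec_solve n out) := by unfold Spec_solve; infer_instance

-- ===== CLAIM (what is proved, stated in full; the proofs are below) =====
def Claim_equal_solve : Prop := ∀ (n : Int), Dom_solve n → Pre_solve n → Spec_solve n (solve n)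

-- ===== LEMMAS AND PROOFS =====

-- insertBy walks past a prefix it does not insert into
theorem insertBy_append_of_not_before {α : Type} (before : α → α → Bool) (x : α)
    (A B : List α) (h : ∀ a ∈ A, before x a = false) :
    PySem.List.insertBy before x (A ++ B) = A ++ PySem.List.insertBy before x B := by
  induction A with
  | nil => simp
  | cons a t ih =>
      simp only [List.cons_append, PySem.List.insertBy, h a (by simp)]
      simp only [Bool.false_eq_true, if_false]
      exact congrArg (a :: ·) (ih (fun a ha => h a (by simp [ha])))

-- stable sort by a {0,1}-valued key is the stable partition
theorem foldl_insertBy_binary (key : Int → Int) (xs A B : List Int)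
    (hA : ∀ a ∈ A, key a = 0) (hB : ∀ b ∈ B, key b = 1)
    (hx : ∀ x ∈ xs, key x = 0 ∨ key x = 1) :
    xs.foldl (fun acc x => PySem.List.insertBy (fun a b => decide (key a < key b)) x acc) (A ++ B)
      = (A ++ xs.filter (fun x => key x == 0)) ++ (B ++ xs.filter (fun x => key x == 1)) := by
  induction xs generalizing A B with
  | nil => simp
  | cons x t ih =>
      have hx0 := hx x (by simp)
      rcases hx0 with h0 | h1
      · have hstep : PySem.List.insertBy (fun a b => decide (key a < key b)) x (A ++ B)
            = (A ++ [x]) ++ B := by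
          rw [insertBy_append_of_not_before _ _ _ _
            (fun a ha => by simp [hA a ha, h0])]
          cases B with
          | nil => simp [PySem.List.insertBy]
          | cons b bt =>
              have : key b = 1 := hB b (by simp)
              simp [PySem.List.insertBy, this, h0]
        simp only [List.foldl_cons, hstep]
        have hA' : ∀ a ∈ A ++ [x], key a = 0 := by
          intro a ha
          rcases List.mem_append.mp ha with h | h
          · exact hA a h
          · simp at h; subst h; exact h0
        rw [ih (A ++ [x]) B hA' hB (fun y hy => hx y (by simp [hy]))]
        simp [h0]
      · have hstep : PySem.List.insertBy (fun a b => decide (key a < key b)) x (A ++ B)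
            = A ++ (B ++ [x]) := by
          rw [insertBy_append_of_not_before _ _ _ _
            (fun a ha => by simp [hA a ha, h1])]
          have : PySem.List.insertBy (fun a b => decide (key a < key b)) x (B ++ [])
              = B ++ PySem.List.insertBy (fun a b => decide (key a < key b)) x [] := by
            exact insertBy_append_of_not_before _ _ _ _
              (fun b hb => by simp [hB b hb, h1])
          simpa [PySem.List.insertBy] using this
        simp only [List.foldl_cons, hstep]
        have hB' : ∀ b ∈ B ++ [x], key b = 1 := by
          intro b hb
          rcases List.mem_append.mp hb with h | h
          · exact hB b h
          · simp at h; subst h; exact h1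
        rw [ih A (B ++ [x]) hA hB' (fun y hy => hx y (by simp [hy]))]
        simp [h1]

theorem sorted_binary (key : Int → Int) (xs : List Int)
    (hx : ∀ x ∈ xs, key x = 0 ∨ key x = 1) :
    PySem.List.sorted xs key
      = xs.filter (fun x => key x == 0) ++ xs.filter (fun x => key x == 1) := by
  rw [PySem.List.sorted_eq_foldl_insertBy]
  simpa using foldl_insertBy_binary key xs [] [] (by simp) (by simp) hx

-- the three step-2 ranges as maps over List.range
theorem evens_eq (m : Nat) :
    PySem.List.pyRange 2 ((m : Int) + 1) 2
      = (List.range (m / 2)).map (fun k : Nat => 2 + 2 * (k : Int)) := by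
  rw [PySem.List.pyRange_of_pos _ _ (by norm_num)]
  have hc : (if (2:Int) < ((m : Int) + 1) then (((m : Int) + 1 - 2 + 2 - 1) / 2).toNat else 0) = m / 2 := by
    split <;> omega
  rw [hc]

theorem odds_eq (m : Nat) :
    PySem.List.pyRange 1 ((m : Int) + 1) 2
      = (List.range ((m + 1) / 2)).map (fun k : Nat => 1 + 2 * (k : Int)) := by
  rw [PySem.List.pyRange_of_pos _ _ (by norm_num)]
  have hc : (if (1:Int) < ((m : Int) + 1) then (((m : Int) + 1 - 1 + 2 - 1) / 2).toNat else 0) = (m + 1) / 2 := by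
    split <;> omega
  rw [hc]

theorem evens_eq' (m : Nat) :
    PySem.List.pyRange 2 (m : Int) 2
      = (List.range ((m - 1) / 2)).map (fun k : Nat => 2 + 2 * (k : Int)) := by
  rw [PySem.List.pyRange_of_pos _ _ (by norm_num)]
  have hc : (if (2:Int) < (m : Int) then (((m : Int) - 2 + 2 - 1) / 2).toNat else 0) = (m - 1) / 2 := by
    split <;> omega
  rw [hc]

theorem odds_eq' (m : Nat) :
    PySem.List.pyRange 1 (m : Int) 2
      = (List.range (m / 2)).map (fun k : Nat => 1 + 2 * (k : Int)) := by
  rw [PySem.List.pyRange_of_pos _ _ (by norm_num)]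
  have hc : (if (1:Int) < (m : Int) then (((m : Int) - 1 + 2 - 1) / 2).toNat else 0) = m / 2 := by
    split <;> omega
  rw [hc]

-- parity filters of range(1, m+1) are the step-2 ranges
theorem filter_parity_range (m : Nat) :
    (PySem.List.pyRange 1 ((m : Int) + 1) 1).filter (fun x => PySem.Int.mod x 2 == 0)
        = PySem.List.pyRange 2 ((m : Int) + 1) 2
    ∧ (PySem.List.pyRange 1 ((m : Int) + 1) 1).filter (fun x => PySem.Int.mod x 2 == 1)
        = PySem.List.pyRange 1 ((m : Int) + 1) 2 := by
  induction m with
  | zero => constructor <;> decide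
  | succ m ih =>
      have hstep : PySem.List.pyRange 1 ((↑(m + 1) : Int) + 1) 1
          = PySem.List.pyRange 1 ((m : Int) + 1) 1 ++ [(m : Int) + 1] := by
        have h : ((↑(m + 1) : Int) + 1) = ((m : Int) + 1) + 1 := by push_cast; ring
        rw [h, PySem.List.pyRange_one_succ_right (by omega)]
      have hmod : PySem.Int.mod ((m : Int) + 1) 2 = ((m : Int) + 1) % 2 :=
        PySem.Int.mod_eq_emod_of_pos (by norm_num)
      rcases Nat.even_or_odd m with he | ho
      · -- m even, m + 1 odd: the new element goes to the odd filter
        obtain ⟨k, hk⟩ := he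
        have hmod1 : PySem.Int.mod ((m : Int) + 1) 2 = 1 := by rw [hmod]; omega
        constructor
        · rw [hstep, List.filter_append, ih.1, evens_eq, evens_eq]
          have hfil : List.filter (fun x => PySem.Int.mod x 2 == 0) [(m : Int) + 1] = [] := by
            simp only [List.filter_cons, List.filter_nil, hmod1]
            norm_num
          rw [hfil, List.append_nil]
          have hc : m / 2 = (m + 1) / 2 := by omega
          rw [hc]
        · rw [hstep, List.filter_append, ih.2, odds_eq, odds_eq]
          have hfil : List.filter (fun x => PySem.Int.mod x 2 == 1) [(m : Int) + 1]
              = [(m : Int) + 1] := by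
            simp only [List.filter_cons, List.filter_nil, hmod1]
            norm_num
          rw [hfil]
          have hgrow : (m + 1 + 1) / 2 = (m + 1) / 2 + 1 := by omega
          rw [hgrow, List.range_succ, List.map_append]
          congr 2
          simp only [List.map_cons, List.map_nil, List.cons.injEq, and_true]
          omega
      · -- m odd, m + 1 even: the new element goes to the even filter
        obtain ⟨k, hk⟩ := ho
        have hmod0 : PySem.Int.mod ((m : Int) + 1) 2 = 0 := by rw [hmod]; omega
        constructor
        · rw [hstep, List.filter_append, ih.1, evens_eq, evens_eq]
          have hfil : List.filter (fun x => PySem.Int.mod x 2 == 0) [(m : Int) + 1]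
              = [(m : Int) + 1] := by
            simp only [List.filter_cons, List.filter_nil, hmod0]
            norm_num
          rw [hfil]
          have hgrow : (m + 1) / 2 = m / 2 + 1 := by omega
          rw [hgrow, List.range_succ, List.map_append]
          congr 2
          simp only [List.map_cons, List.map_nil, List.cons.injEq, and_true]
          omega
        · rw [hstep, List.filter_append, ih.2, odds_eq, odds_eq]
          have hfil : List.filter (fun x => PySem.Int.mod x 2 == 1) [(m : Int) + 1] = [] := by
            simp only [List.filter_cons, List.filter_nil, hmod0]
            norm_num
          rw [hfil, List.append_nil]
          have hc : (m + 1) / 2 = (m + 1 + 1) / 2 := by omega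
          rw [hc]

theorem pyRange_nil_of_le (a b s : Int) (hs : 0 < s) (h : b ≤ a) :
    PySem.List.pyRange a b s = [] := by
  rw [PySem.List.pyRange_of_pos _ _ hs, if_neg (by omega)]
  simp

theorem mod_two_zero_or_one (x : Int) : PySem.Int.mod x 2 = 0 ∨ PySem.Int.mod x 2 = 1 := by
  have h1 := PySem.Int.mod_nonneg x (b := 2) (by norm_num)
  have h2 := PySem.Int.mod_lt x (b := 2) (by norm_num)
  omega

-- the common closed form of both ports away from the guard cases
theorem solve_eq_flat (n : Int) (h1 : n ≠ 1) (h2 : n ≠ 2) (h3 : n ≠ 3) :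
    solve n = String.ofList
      ((PySem.List.pyRange 2 (n + 1) 2 ++ PySem.List.pyRange 1 (n + 1) 2).flatMap
        (fun i => PySem.Int.toChars i ++ [' '])) := by
  unfold solve
  rw [if_neg h1, if_neg (by tauto)]
  by_cases hp : PySem.Int.mod n 2 = 0
  · rw [if_pos hp]
    have hEq : PySem.List.pyRange 1 n 2 = PySem.List.pyRange 1 (n + 1) 2 := by
      by_cases hn : 0 < n
      · obtain ⟨m, hm⟩ : ∃ m : Nat, n = (m : Int) := ⟨n.toNat, by omega⟩
        have heven : n % 2 = 0 := by
          rw [PySem.Int.mod_eq_emod_of_pos (by norm_num)] at hp; exact hp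
        subst hm
        rw [odds_eq' m, odds_eq m]
        have hc : m / 2 = (m + 1) / 2 := by omega
        rw [hc]
      · rw [pyRange_nil_of_le _ _ _ (by norm_num) (by omega),
            pyRange_nil_of_le _ _ _ (by norm_num) (by omega)]
    rw [PySem.List.foldl_append_eq_flatMap, PySem.List.foldl_append_eq_flatMap, hEq]
    simp [List.flatMap_append]
  · rw [if_neg hp]
    have hEq : PySem.List.pyRange 2 n 2 = PySem.List.pyRange 2 (n + 1) 2 := by
      by_cases hn : 0 < n
      · obtain ⟨m, hm⟩ : ∃ m : Nat, n = (m : Int) := ⟨n.toNat, by omega⟩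
        have hodd : n % 2 = 1 := by
          have := mod_two_zero_or_one n
          rw [PySem.Int.mod_eq_emod_of_pos (by norm_num)] at this hp
          omega
        subst hm
        rw [evens_eq' m, evens_eq m]
        have hc : (m - 1) / 2 = m / 2 := by omega
        rw [hc]
      · rw [pyRange_nil_of_le _ _ _ (by norm_num) (by omega),
            pyRange_nil_of_le _ _ _ (by norm_num) (by omega)]
    rw [PySem.List.foldl_append_eq_flatMap, PySem.List.foldl_append_eq_flatMap, hEq]
    simp [List.flatMap_append]

theorem solve_alt_eq_flat (n : Int) (h1 : n ≠ 1) (h2 : n ≠ 2) (h3 : n ≠ 3) :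
    solve_alt n = String.ofList
      ((PySem.List.pyRange 2 (n + 1) 2 ++ PySem.List.pyRange 1 (n + 1) 2).flatMap
        (fun i => PySem.Int.toChars i ++ [' '])) := by
  unfold solve_alt
  rw [if_neg h1, if_neg (by tauto)]
  simp only [← List.flatMap_def]
  congr 2
  rw [sorted_binary _ _ (fun x _ => mod_two_zero_or_one x)]
  by_cases hn : 0 < n
  · obtain ⟨m, hm⟩ : ∃ m : Nat, n = (m : Int) := ⟨n.toNat, by omega⟩
    subst hm
    rw [(filter_parity_range m).1, (filter_parity_range m).2]
  · rw [pyRange_nil_of_le _ _ _ (by norm_num) (by omega),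
        pyRange_nil_of_le _ _ _ (by norm_num) (by omega),
        pyRange_nil_of_le _ _ _ (by norm_num) (by omega)]
    simp

-- ===== VERDICT (by name: the statement is the Claim_ definition above) =====
theorem solve_spec : Claim_equal_solve := by
  intro n _ hpre
  unfold Spec_solve
  by_cases h2 : n = 2
  · subst h2; decide
  by_cases h3 : n = 3
  · subst h3; decide
  rw [solve_eq_flat n hpre h2 h3, solve_alt_eq_flat n hpre h2 h3]
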